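-- pv_equiv track=rewrite | github.com/HyunjunJeon/problem_solving_python | inflearn_python_algorithm/ch5/5-7.py | solve
-- ===== SOURCE A (Python) =====
-- from collections import deque
--
-- def solve(check: str, input: str):
--     check = deque(check)
--     for x in input:
--         if x in check:
--             if x != check.popleft():
--                 return "NO"
--     else:
--         if len(check) == 0:
--             return "YES"
--         else:
--             return "NO"
-- ===== SOURCE B (Python) =====
-- from collections import Counter
--
-- def solve(check: str, input: str):
--     remaining = Counter(check)
--     i = 0
--     for x in input:
--         if remaining[x] > 0:
--             if x != check[i]:
--                 return "NO"
--             remaining[x] -= 1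
--             i += 1
--     return "YES" if i == len(check) else "NO"
-- ===== Notes on version B (the rewrite author's own statement) =====
-- stated objective: faster
-- what changed: Replaces the mutating deque with O(k) membership scans per input char by a one-pass Counter of remaining characters plus a front-index into the unchanged check string, giving O(1) membership and popleft.
import Mathlib
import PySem

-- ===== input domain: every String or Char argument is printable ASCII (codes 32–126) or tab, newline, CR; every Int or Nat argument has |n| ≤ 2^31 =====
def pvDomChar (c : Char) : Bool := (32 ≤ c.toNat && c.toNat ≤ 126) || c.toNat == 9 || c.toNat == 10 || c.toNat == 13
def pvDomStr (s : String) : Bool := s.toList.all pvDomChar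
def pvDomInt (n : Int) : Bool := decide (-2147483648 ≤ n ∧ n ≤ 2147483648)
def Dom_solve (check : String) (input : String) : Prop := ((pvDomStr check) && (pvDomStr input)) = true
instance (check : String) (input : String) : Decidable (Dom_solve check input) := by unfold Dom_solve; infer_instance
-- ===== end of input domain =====

-- B replaces A's O(k) deque-membership scan per input char by a Counter of the remaining
-- characters plus a front index into the unchanged check string (objective: faster, asymptotic).

-- ===== PORT A =====
-- deque state dq (front at head); 'x in check' is dq.contains x, popleft takes the head.
def solveLoopA : List Char → List Char → String
  | dq, [] => if dq.length = 0 then "YES" else "NO"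
  | dq, x :: xs =>
    if dq.contains x then
      match dq with
      | [] => "NO"            -- unreachable: contains on [] is false, so popleft never sees an empty deque
      | h :: t => if x ≠ h then "NO" else solveLoopA t xs
    else solveLoopA dq xs

def solve (check : String) (input : String) : String :=
  solveLoopA check.toList input.toList

-- ===== PORT B =====
-- rem = Counter of check[i:], i = front index; rem[x] > 0 iff x occurs in check[i:].
def solveLoopB (check : List Char) : PySem.Dict Char Int → Nat → List Char → String
  | _rem, i, [] => if i = check.length then "YES" else "NO"
  | rem, i, x :: xs =>
    if rem.getD x 0 > 0 then
      match check[i]? with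
      | none => "NO"          -- unreachable: rem[x] > 0 forces i < check.length (Python would raise IndexError)
      | some c =>
        if x ≠ c then "NO"
        else solveLoopB check (rem.modify x 0 (· - 1)) (i + 1) xs
    else solveLoopB check rem i xs

def solve_alt (check : String) (input : String) : String :=
  solveLoopB check.toList (PySem.Dict.counter check.toList) 0 input.toList

-- ===== PRECONDITION & SPEC =====
def Spec_solve (check : String) (input : String) (out : String) : Prop := out = solve_alt check input
instance (check : String) (input : String) (out : String) : Decidable (Spec_solve check input out) := by unfold Spec_solve; infer_instance

-- ===== CLAIM (what is proved, stated in full; the proofs are below) =====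
def Claim_equal_solve : Prop := ∀ (check : String) (input : String), Dom_solve check input → Spec_solve check input (solve check input)

-- ===== LEMMAS AND PROOFS =====

-- Loop invariant: rem holds the multiset of check[i:], so the two loops agree.
lemma loop_eq (cs : List Char) :
    ∀ (inp : List Char) (i : Nat) (rem : PySem.Dict Char Int),
      i ≤ cs.length →
      (∀ c, rem.getD c 0 = ((cs.drop i).count c : Int)) →
      solveLoopA (cs.drop i) inp = solveLoopB cs rem i inp := by
  intro inp
  induction inp with
  | nil =>
    intro i rem hi hinv
    simp only [solveLoopA, solveLoopB, List.length_drop]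
    split_ifs <;> first | rfl | omega
  | cons x xs ih =>
    intro i rem hi hinv
    by_cases hp : rem.getD x 0 > 0
    · have hcnt : 0 < (cs.drop i).count x := by
        have := hinv x; omega
      have hmem : x ∈ cs.drop i := List.count_pos_iff.mp hcnt
      have hlt : i < cs.length := by
        by_contra h
        have : cs.drop i = [] := List.drop_eq_nil_of_le (by omega)
        simp [this] at hmem
      have hdq : cs.drop i = cs[i] :: cs.drop (i + 1) :=
        List.drop_eq_getElem_cons hlt
      have hget : cs[i]? = some cs[i] := List.getElem?_eq_getElem hlt
      have hcontains : (cs.drop i).contains x = true := by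
        simpa using hmem
      by_cases hx : x = cs[i]
      · have hdq' : cs.drop i = x :: cs.drop (i + 1) := by rw [hdq, hx]
        have hget' : cs[i]? = some x := by rw [hget, hx]
        rw [hdq'] at hcontains ⊢
        simp only [solveLoopA, solveLoopB, hcontains, if_pos hp, hget',
          ne_eq, not_true_eq_false, if_false]
        apply ih _ _ (by omega)
        intro c
        by_cases hc : c = x
        · subst hc
          rw [PySem.Dict.getD_modify_self, hinv c, hdq']
          simp
        · have hc' : ¬ x = c := fun h => hc h.symm
          rw [PySem.Dict.getD_modify_of_ne _ _ _ hc, hinv c, hdq']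
          simp [hc']
      · rw [hdq] at hcontains ⊢
        simp only [solveLoopA, solveLoopB, hcontains, if_pos hp, hget]
        simp [hx]
    · have hz : (cs.drop i).count x = 0 := by
        have := hinv x; omega
      have hnmem : x ∉ cs.drop i := by
        intro h
        exact absurd (List.count_pos_iff.mpr h) (by omega)
      have hcontains : (cs.drop i).contains x = false := by
        simpa using hnmem
      have hrec := ih i rem hi hinv
      cases hdq : cs.drop i with
      | nil =>
        rw [hdq] at hcontains hrec
        simp only [solveLoopA, solveLoopB, hcontains, if_neg hp, Bool.false_eq_true, if_false]
        exact hrec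
      | cons h t =>
        rw [hdq] at hcontains hrec
        simp only [solveLoopA, solveLoopB, hcontains, if_neg hp, Bool.false_eq_true, if_false]
        exact hrec

-- ===== VERDICT (by name: the statement is the Claim_ definition above) =====
theorem solve_spec : Claim_equal_solve := by
  intro check input _
  unfold Spec_solve solve solve_alt
  have := loop_eq check.toList input.toList 0 (PySem.Dict.counter check.toList)
    (Nat.zero_le _) (by intro c; simp [PySem.Dict.getD_counter])
  simpa using this
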